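-- pv_equiv track=rewrite | github.com/JonathanReardon/EEF-Dashboard | eefdash/myapp/funcs.py | get_outcome_lvl1
-- ===== SOURCE A (Python) =====
-- def get_outcome_lvl1(data, var):
--     outcome_number=[]
--     for study in range(len(data["References"])):
--         if "Outcomes" in data["References"][study]:
--             outcome_number.append(len(data["References"][study]["Outcomes"]))
--     varlist = []
--     for section in range(len(data["References"])):
--         holder = []
--         if "Outcomes" in data["References"][section]:
--             for subsection in range(max(outcome_number)):
--                 if subsection < len(data["References"][section]["Outcomes"]):
--                     holder.append(data["References"][section]["Outcomes"][subsection][var])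
--                 else:
--                     holder.append("NA")
--             varlist.append(holder)
--         else:
--             for i in range(max(outcome_number)):
--                 holder.append("NA")
--             varlist.append(holder)
--     return varlist
-- ===== SOURCE B (Python) =====
-- def get_outcome_lvl1(data, var):
--     # Column-major construction: build one column per outcome index, then
--     # transpose by study index (A is row-major per study with an index test).
--     studies = data["References"]
--     if not studies:
--         return []
--     width = max(len(s["Outcomes"]) for s in studies if "Outcomes" in s)
--     cols = [[s["Outcomes"][j][var] if "Outcomes" in s and j < len(s["Outcomes"]) else "NA"
--              for s in studies]
--             for j in range(width)]
--     return [[col[i] for col in cols] for i in range(len(studies))]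
-- ===== Notes on version B (the rewrite author's own statement) =====
-- stated objective: alternative
-- what changed: B builds the table column-major -- one column per outcome index over all studies -- and then transposes by study index, instead of A's row-major per-study loop that recomputes the max and tests index<len at every cell.
import Mathlib
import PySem

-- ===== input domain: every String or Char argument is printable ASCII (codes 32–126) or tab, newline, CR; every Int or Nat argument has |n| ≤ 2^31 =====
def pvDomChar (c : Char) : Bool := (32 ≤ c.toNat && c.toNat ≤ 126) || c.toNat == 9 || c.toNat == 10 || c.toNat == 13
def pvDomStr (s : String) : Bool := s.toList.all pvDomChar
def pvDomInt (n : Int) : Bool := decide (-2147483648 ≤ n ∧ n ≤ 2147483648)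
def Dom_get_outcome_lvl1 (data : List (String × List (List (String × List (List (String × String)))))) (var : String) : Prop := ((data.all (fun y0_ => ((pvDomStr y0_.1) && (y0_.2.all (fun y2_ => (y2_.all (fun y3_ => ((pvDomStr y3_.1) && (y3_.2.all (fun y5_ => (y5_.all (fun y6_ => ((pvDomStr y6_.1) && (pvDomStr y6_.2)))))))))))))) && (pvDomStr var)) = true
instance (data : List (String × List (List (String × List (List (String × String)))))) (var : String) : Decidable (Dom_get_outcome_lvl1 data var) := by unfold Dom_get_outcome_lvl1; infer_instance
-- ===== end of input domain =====

-- B builds the table column-major (one column per outcome index) and transposes by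
-- study index, instead of A's row-major per-study index<len loop; same values.


-- ===== PORT A =====
def get_outcome_lvl1 (data : List (String × List (List (String × List (List (String × String)))))) (var : String) : List (List String) :=
  let refs := ((PySem.Dict.mk data).get? "References").getD []
  -- first loop: outcome_number.append(len(.."Outcomes"))
  let outcome_number : List Int := refs.foldl (fun acc study =>
    if (PySem.Dict.mk study).contains "Outcomes" then
      acc ++ [((((PySem.Dict.mk study).get? "Outcomes").getD []).length : Int)]
    else acc) []
  -- second loop
  refs.foldl (fun varlist sec =>
    if (PySem.Dict.mk sec).contains "Outcomes" then
      let holder := (PySem.List.pyRange 0 ((PySem.List.max? outcome_number (fun x => x)).getD 0) 1).foldl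
        (fun h sub =>
          if sub < ((((PySem.Dict.mk sec).get? "Outcomes").getD []).length : Int) then
            h ++ [((PySem.Dict.mk ((PySem.List.pyGet? (((PySem.Dict.mk sec).get? "Outcomes").getD []) sub).getD [])).get? var).getD ""]
          else h ++ ["NA"]) []
      varlist ++ [holder]
    else
      varlist ++ [(PySem.List.pyRange 0 ((PySem.List.max? outcome_number (fun x => x)).getD 0) 1).foldl
        (fun h _ => h ++ ["NA"]) []]) []

-- ===== PORT B =====
def get_outcome_lvl1_alt (data : List (String × List (List (String × List (List (String × String)))))) (var : String) : List (List String) :=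
  let studies := ((PySem.Dict.mk data).get? "References").getD []
  if studies.isEmpty then []
  else
    let width : Int := (PySem.List.max? (studies.filterMap
        (fun s => ((PySem.Dict.mk s).get? "Outcomes").map (fun o => (o.length : Int)))) (fun x => x)).getD 0
    let cols : List (List String) := (PySem.List.pyRange 0 width 1).map (fun j =>
      studies.map (fun s =>
        if ((PySem.Dict.mk s).contains "Outcomes"
              && decide (j < ((((PySem.Dict.mk s).get? "Outcomes").getD []).length : Int))) then
          ((PySem.Dict.mk ((PySem.List.pyGet? (((PySem.Dict.mk s).get? "Outcomes").getD []) j).getD [])).get? var).getD ""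
        else "NA"))
    (PySem.List.pyRange 0 (studies.length : Int) 1).map (fun i =>
      cols.map (fun col => (PySem.List.pyGet? col i).getD ""))

-- ===== PRECONDITION & SPEC =====
-- Pre_ excludes exactly the inputs where the Python A raises: no "References" key (KeyError),
-- a nonempty reference list in which no study has an "Outcomes" key (max([]) ValueError),
-- and an outcome dict missing var (KeyError).  B raises on the same inputs.
def Pre_get_outcome_lvl1 (data : List (String × List (List (String × List (List (String × String)))))) (var : String) : Prop :=
  (PySem.Dict.mk data).contains "References" = true ∧
  (((PySem.Dict.mk data).get? "References").getD [] = [] ∨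
    ∃ s ∈ ((PySem.Dict.mk data).get? "References").getD [], (PySem.Dict.mk s).contains "Outcomes" = true) ∧
  ∀ s ∈ ((PySem.Dict.mk data).get? "References").getD [],
    ∀ o ∈ ((PySem.Dict.mk s).get? "Outcomes").getD [], (PySem.Dict.mk o).contains var = true
instance (data : List (String × List (List (String × List (List (String × String)))))) (var : String) : Decidable (Pre_get_outcome_lvl1 data var) := by unfold Pre_get_outcome_lvl1; infer_instance
def pvWitness_get_outcome_lvl1 : (List (String × List (List (String × List (List (String × String)))))) × String :=
  ([("References", [[("Outcomes", [[("x", "1")], [("x", "2"), ("y", "u")]])], [], [("Outcomes", [])]])], "x")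

def Spec_get_outcome_lvl1 (data : List (String × List (List (String × List (List (String × String)))))) (var : String) (out : List (List String)) : Prop := out = get_outcome_lvl1_alt data var
instance (data : List (String × List (List (String × List (List (String × String)))))) (var : String) (out : List (List String)) : Decidable (Spec_get_outcome_lvl1 data var out) := by unfold Spec_get_outcome_lvl1; infer_instance

-- ===== CLAIM (what is proved, stated in full; the proofs are below) =====
def Claim_equal_get_outcome_lvl1 : Prop := ∀ (data : List (String × List (List (String × List (List (String × String)))))) (var : String), Dom_get_outcome_lvl1 data var → Pre_get_outcome_lvl1 data var → Spec_get_outcome_lvl1 data var (get_outcome_lvl1 data var)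

-- ===== LEMMAS AND PROOFS =====

-- the cell value both tables agree on, study s / outcome index j
def pvCell (var : String) (s : List (String × List (List (String × String)))) (j : Int) : String :=
  if ((PySem.Dict.mk s).contains "Outcomes"
        && decide (j < ((((PySem.Dict.mk s).get? "Outcomes").getD []).length : Int))) then
    ((PySem.Dict.mk ((PySem.List.pyGet? (((PySem.Dict.mk s).get? "Outcomes").getD []) j).getD [])).get? var).getD ""
  else "NA"

-- A's width list (the filtered fold) equals B's filterMap width list
theorem pv_widths_eq (refs : List (List (String × List (List (String × String))))) :
    refs.filterMap (fun s => ((PySem.Dict.mk s).get? "Outcomes").map (fun o => (o.length : Int)))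
    = (refs.filter (fun s => (PySem.Dict.mk s).contains "Outcomes")).map
        (fun s => ((((PySem.Dict.mk s).get? "Outcomes").getD []).length : Int)) := by
  induction refs with
  | nil => rfl
  | cons s t ih =>
    rw [List.filterMap_cons, List.filter_cons]
    rw [PySem.Dict.contains_eq_isSome_get?]
    cases h : (PySem.Dict.mk s).get? "Outcomes" with
    | none => simpa [h] using ih
    | some outs => simp [h, ih]

-- A's per-study holder is the row of cells, study with "Outcomes"
theorem pv_holderA_cell (var : String) (sec : List (String × List (List (String × String))))
    (w : Int) (hc : (PySem.Dict.mk sec).contains "Outcomes" = true) :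
    (PySem.List.pyRange 0 w 1).foldl
      (fun h sub =>
        if sub < ((((PySem.Dict.mk sec).get? "Outcomes").getD []).length : Int) then
          h ++ [((PySem.Dict.mk ((PySem.List.pyGet? (((PySem.Dict.mk sec).get? "Outcomes").getD []) sub).getD [])).get? var).getD ""]
        else h ++ ["NA"]) []
    = (PySem.List.pyRange 0 w 1).map (pvCell var sec) := by
  rw [show (fun (h : List String) sub =>
        if sub < ((((PySem.Dict.mk sec).get? "Outcomes").getD []).length : Int) then
          h ++ [((PySem.Dict.mk ((PySem.List.pyGet? (((PySem.Dict.mk sec).get? "Outcomes").getD []) sub).getD [])).get? var).getD ""]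
        else h ++ ["NA"])
      = (fun (h : List String) sub => h ++ [pvCell var sec sub]) from by
    funext h sub; unfold pvCell; rw [hc]; by_cases hlt : sub < ((((PySem.Dict.mk sec).get? "Outcomes").getD []).length : Int) <;> simp [hlt]]
  rw [PySem.List.foldl_append_singleton_eq_map, List.nil_append]

-- A's per-study holder is the row of cells, study without "Outcomes"
theorem pv_holderA_na (var : String) (sec : List (String × List (List (String × String))))
    (w : Int) (hc : (PySem.Dict.mk sec).contains "Outcomes" = false) :
    (PySem.List.pyRange 0 w 1).foldl (fun h _ => h ++ ["NA"]) []
    = (PySem.List.pyRange 0 w 1).map (pvCell var sec) := by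
  rw [show (fun (h : List String) (x : Int) => h ++ ["NA"])
      = (fun (h : List String) x => h ++ [pvCell var sec x]) from by
    funext h x; unfold pvCell; rw [hc]; simp]
  rw [PySem.List.foldl_append_singleton_eq_map, List.nil_append]

-- transpose of the column-major table is the row-major table
theorem pv_transpose (var : String) (refs : List (List (String × List (List (String × String)))))
    (w : Int) :
    (PySem.List.pyRange 0 (refs.length : Int) 1).map (fun i =>
      ((PySem.List.pyRange 0 w 1).map (fun j => refs.map (fun s => pvCell var s j))).map
        (fun col => (PySem.List.pyGet? col i).getD ""))
    = refs.map (fun s => (PySem.List.pyRange 0 w 1).map (pvCell var s)) := by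
  apply List.ext_getElem
  · simp [PySem.List.length_pyRange_one]
  · intro i h1 h2
    have hi : i < refs.length := by
      simpa [PySem.List.length_pyRange_one] using h1
    simp only [List.getElem_map, List.map_map]
    rw [PySem.List.getElem_pyRange_one]
    apply List.ext_getElem
    · simp
    · intro j j1 j2
      simp only [List.getElem_map, Function.comp_apply]
      simp only [zero_add, PySem.List.pyGet?_natCast, List.getElem?_map,
        List.getElem?_eq_getElem hi, Option.map_some, Option.getD_some]

-- ===== VERDICT (by name: the statement is the Claim_ definition above) =====
theorem get_outcome_lvl1_spec : Claim_equal_get_outcome_lvl1 := by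
  intro data var _ _
  unfold Spec_get_outcome_lvl1 get_outcome_lvl1 get_outcome_lvl1_alt
  dsimp only
  set refs := ((PySem.Dict.mk data).get? "References").getD [] with hrefs
  by_cases hnil : refs = []
  · simp [hnil]
  · rw [if_neg (by simpa [List.isEmpty_iff] using hnil)]
    -- both width expressions are the same integer
    rw [PySem.List.foldl_append_if
        (p := fun study => (PySem.Dict.mk study).contains "Outcomes")
        (f := fun study => ((((PySem.Dict.mk study).get? "Outcomes").getD []).length : Int)),
      List.nil_append, pv_widths_eq]
    set w : Int := (PySem.List.max? ((refs.filter (fun s => (PySem.Dict.mk s).contains "Outcomes")).map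
        (fun s => ((((PySem.Dict.mk s).get? "Outcomes").getD []).length : Int))) (fun x => x)).getD 0 with hw
    -- A's outer loop becomes the row-major map of cells
    rw [show (fun (varlist : List (List String)) sec =>
          if (PySem.Dict.mk sec).contains "Outcomes" then
            varlist ++ [(PySem.List.pyRange 0 w 1).foldl
              (fun h sub =>
                if sub < ((((PySem.Dict.mk sec).get? "Outcomes").getD []).length : Int) then
                  h ++ [((PySem.Dict.mk ((PySem.List.pyGet? (((PySem.Dict.mk sec).get? "Outcomes").getD []) sub).getD [])).get? var).getD ""]
                else h ++ ["NA"]) []]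
          else varlist ++ [(PySem.List.pyRange 0 w 1).foldl (fun h _ => h ++ ["NA"]) []])
        = (fun varlist sec => varlist ++ [(PySem.List.pyRange 0 w 1).map (pvCell var sec)])
        from by
      funext varlist sec
      cases hc : (PySem.Dict.mk sec).contains "Outcomes" with
      | true => rw [if_pos rfl, pv_holderA_cell var sec w hc]
      | false => rw [if_neg (by simp), pv_holderA_na var sec w hc]]
    rw [PySem.List.foldl_append_singleton_eq_map, List.nil_append]
    -- B's column-major table transposed is the same row-major map
    rw [show (fun (j : Int) => refs.map (fun s =>
          if ((PySem.Dict.mk s).contains "Outcomes"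
                && decide (j < ((((PySem.Dict.mk s).get? "Outcomes").getD []).length : Int))) then
            ((PySem.Dict.mk ((PySem.List.pyGet? (((PySem.Dict.mk s).get? "Outcomes").getD []) j).getD [])).get? var).getD ""
          else "NA"))
        = (fun j => refs.map (fun s => pvCell var s j)) from rfl]
    rw [pv_transpose]
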